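-- pv_equiv track=rewrite | github.com/JaskRendix/Tuxemon | tuxemon/mission.py | unique_variables_across_sequences
-- ===== SOURCE A (Python) =====
-- from collections.abc import Mapping, Sequence
-- from typing import TYPE_CHECKING, Any, Optional
--
-- def unique_variables_across_sequences(
--     sequences: Sequence[str],
-- ) -> Optional[str]:
--     sequence_variables: dict[str, int] = {}
--     for sequence in sequences:
--         variables = sequence.split(",")
--         for variable in variables:
--             variable = variable.strip()
--             sequence_variables[variable] = (
--                 sequence_variables.get(variable, 0) + 1
--             )
--
--     for variable, count in sequence_variables.items():
--         if count > 1: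
--             return variable
--     return None
-- ===== SOURCE B (Python) =====
-- def unique_variables_across_sequences(sequences):
--     flat = [v.strip() for s in sequences for v in s.split(",")]
--     for i, v in enumerate(flat):
--         if v in flat[i + 1:]:
--             return v
--     return None
-- ===== Notes on version B (the rewrite author's own statement) =====
-- stated objective: simpler
-- what changed: Drops A's frequency dictionary entirely: B scans the flattened stripped tokens once and returns the first token that occurs again in the remaining suffix (suffix-membership test instead of count tabulation plus a second scan).
import Mathlib
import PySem

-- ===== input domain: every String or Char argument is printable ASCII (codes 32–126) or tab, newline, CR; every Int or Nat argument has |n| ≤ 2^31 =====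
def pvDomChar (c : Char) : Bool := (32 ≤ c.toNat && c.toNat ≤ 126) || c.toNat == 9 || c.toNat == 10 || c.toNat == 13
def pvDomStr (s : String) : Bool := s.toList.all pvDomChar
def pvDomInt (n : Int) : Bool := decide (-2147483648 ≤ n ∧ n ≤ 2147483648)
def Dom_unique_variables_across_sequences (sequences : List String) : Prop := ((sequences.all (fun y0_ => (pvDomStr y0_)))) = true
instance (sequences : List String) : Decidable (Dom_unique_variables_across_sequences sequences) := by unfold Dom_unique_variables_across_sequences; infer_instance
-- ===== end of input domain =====

-- B drops A's frequency dictionary: it scans the flattened stripped tokens once and returns the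
-- first token that occurs again in the remaining suffix (alternative decomposition, not faster).

-- ===== PORT A =====
def unique_variables_across_sequences (sequences : List String) : Option String :=
  let d : PySem.Dict String Int :=
    sequences.foldl (fun d s =>
      ((PySem.Str.split? s ",").getD []).foldl (fun d variable_ =>
        let v := PySem.Str.strip variable_
        d.insert v (d.getD v 0 + 1)) d) PySem.Dict.empty
  (d.items.find? (fun p => decide (1 < p.2))).map (·.1)

-- ===== PORT B =====
-- the loop over `enumerate(flat)` with the suffix test `v in flat[i+1:]`: structural recursion,
-- where the suffix flat[i+1:] is exactly the recursion's tail
def pvSuffixScan : List String → Option String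
  | [] => none
  | v :: rest => if rest.contains v then some v else pvSuffixScan rest

def unique_variables_across_sequences_alt (sequences : List String) : Option String :=
  let flat : List String :=
    sequences.flatMap (fun s => ((PySem.Str.split? s ",").getD []).map PySem.Str.strip)
  pvSuffixScan flat

-- ===== PRECONDITION & SPEC =====
def Spec_unique_variables_across_sequences (sequences : List String) (out : Option String) : Prop := out = unique_variables_across_sequences_alt sequences
instance (sequences : List String) (out : Option String) : Decidable (Spec_unique_variables_across_sequences sequences out) := by unfold Spec_unique_variables_across_sequences; infer_instance

-- ===== CLAIM (what is proved, stated in full; the proofs are below) =====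
def Claim_equal_unique_variables_across_sequences : Prop := ∀ (sequences : List String), Dom_unique_variables_across_sequences sequences → Spec_unique_variables_across_sequences sequences (unique_variables_across_sequences sequences)

-- ===== LEMMAS AND PROOFS =====

-- Scanning a Python set (ordered dedup) with find? gives the same answer as scanning the
-- underlying list: the accumulator-general form of the statement, by induction on the list.
theorem find?_foldl_add {α : Type} [BEq α] [LawfulBEq α] (q : α → Bool) :
    ∀ (l s : List α), (l.foldl PySem.Set.add s).find? q = (s ++ l).find? q := by
  intro l
  induction l with
  | nil => intro s; simp
  | cons x t ih =>
    intro s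
    rw [List.foldl_cons, ih]
    by_cases hx : (s : List α).contains x = true
    · have hmem : x ∈ s := List.contains_iff_mem.mp hx
      have hadd : PySem.Set.add s x = s := by simp [PySem.Set.add, PySem.Set.contains, hmem]
      rw [hadd, List.find?_append, List.find?_append]
      cases hfs : (s : List α).find? q with
      | some w => simp
      | none =>
        have hnx : q x = false := eq_false_of_ne_true (List.find?_eq_none.mp hfs x hmem)
        simp [hnx]
    · have hnm : x ∉ s := by simpa [List.contains_iff_mem] using hx
      have hadd : PySem.Set.add s x = s ++ [x] := by simp [PySem.Set.add, PySem.Set.contains, hnm]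
      rw [hadd, List.append_assoc]
      rfl

theorem find?_ofList {α : Type} [BEq α] [LawfulBEq α] (q : α → Bool) (l : List α) :
    ((PySem.Set.ofList l : List α).find? q) = l.find? q := by
  have := find?_foldl_add q l ([] : List α)
  simpa [PySem.Set.ofList, PySem.Set.empty] using this

-- The heart of the equivalence: over a list p ++ l in which the already-scanned prefix p has no
-- duplicates and nothing of p recurs in l, the first element whose total count exceeds 1 is the
-- first element of l that recurs in its own suffix.
theorem find?_count_eq_suffixScan :
    ∀ (l p : List String), p.Nodup → (∀ x ∈ p, x ∉ l) →
      (p ++ l).find? (fun v => decide (1 < (p ++ l).count v)) = pvSuffixScan l := by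
  intro l
  induction l with
  | nil =>
    intro p hnd _
    rw [List.find?_eq_none.mpr, pvSuffixScan]
    intro x hx
    simp only [List.append_nil] at hx ⊢
    simp [List.count_eq_one_of_mem hnd hx]
  | cons v rest ih =>
    intro p hnd hpl
    have hvp : v ∉ p := fun hv => hpl v hv (by simp)
    have hpcount : ∀ x ∈ p, ((p ++ v :: rest).count x) = 1 := by
      intro x hx
      have hxl : x ∉ v :: rest := hpl x hx
      rw [List.count_append, List.count_eq_one_of_mem hnd hx, List.count_eq_zero.mpr hxl]
    have hfp : p.find? (fun v' => decide (1 < (p ++ v :: rest).count v')) = none := by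
      rw [List.find?_eq_none]
      intro x hx
      simp [hpcount x hx]
    by_cases hc : rest.contains v = true
    · have hmem : v ∈ rest := List.contains_iff_mem.mp hc
      have hcnt : 1 < (p ++ v :: rest).count v := by
        have : 1 ≤ rest.count v := List.count_pos_iff.mpr hmem
        rw [List.count_append, List.count_cons_self]
        omega
      rw [List.find?_append, hfp]
      rw [show (List.find? (fun v' => decide (1 < (p ++ v :: rest).count v')) (v :: rest)) = some v
        from List.find?_cons_of_pos (by simpa using hcnt)]
      rw [pvSuffixScan, if_pos hc]
      rfl
    · have hnm : v ∉ rest := by simpa [List.contains_iff_mem] using hc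
      have hcnt : (p ++ v :: rest).count v = 1 := by
        rw [List.count_append, List.count_cons_self, List.count_eq_zero.mpr hnm,
          List.count_eq_zero.mpr hvp]
      have hassoc : p ++ v :: rest = (p ++ [v]) ++ rest := by simp
      have hnd' : (p ++ [v]).Nodup := by
        simp [List.nodup_append, hnd]
        intro a ha h
        exact hvp (h ▸ ha)
      have hpl' : ∀ x ∈ p ++ [v], x ∉ rest := by
        intro x hx
        rcases List.mem_append.mp hx with h | h
        · exact fun hr => hpl x h (by simp [hr])
        · simp at h; subst h; exact hnm
      have := ih (p ++ [v]) hnd' hpl'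
      rw [hassoc, this, pvSuffixScan, if_neg hc]

-- ===== VERDICT (by name: the statement is the Claim_ definition above) =====
theorem unique_variables_across_sequences_spec : Claim_equal_unique_variables_across_sequences := by
  intro sequences _
  show unique_variables_across_sequences sequences = unique_variables_across_sequences_alt sequences
  simp only [unique_variables_across_sequences, unique_variables_across_sequences_alt]
  set flat := sequences.flatMap
      (fun s => ((PySem.Str.split? s ",").getD []).map PySem.Str.strip) with hflat
  have hd : (sequences.foldl (fun d s =>
      ((PySem.Str.split? s ",").getD []).foldl (fun d variable_ =>
        let v := PySem.Str.strip variable_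
        d.insert v (d.getD v 0 + 1)) d) PySem.Dict.empty) = PySem.Dict.counter flat := by
    rw [hflat, ← PySem.Dict.foldl_insert_getD_add_one_eq_counter, List.foldl_flatMap]
    simp only [List.foldl_map]
  rw [hd, PySem.Dict.items_counter, List.find?_map, Option.map_map]
  rw [show (((fun p : String × Int => decide ((1:Int) < p.2)) ∘
      fun k => (k, (flat.count k : Int))) = fun v => decide (1 < flat.count v)) from by
    funext v; simp]
  rw [find?_ofList]
  rw [show (((fun x : String × Int => x.1) ∘ fun k => (k, (flat.count k : Int))) = id) from rfl,
    Option.map_id, id]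
  exact find?_count_eq_suffixScan flat [] (by simp) (by simp)
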